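-- pv_equiv track=rewrite | github.com/jdp71/college-football-predictions | CFDB/retrain_model_with_current_data.py | get_team_conference
-- ===== SOURCE A (Python) =====
-- def get_team_conference(team_name):
--     """Get conference for a team"""
--     conferences = {
--         'SEC': ['Alabama', 'Georgia', 'LSU', 'Texas', 'Oklahoma', 'Auburn', 'Florida', 'Tennessee', 'Arkansas', 'Ole Miss', 'Mississippi State', 'South Carolina', 'Missouri', 'Kentucky', 'Vanderbilt', 'Texas A&M'],
--         'Big Ten': ['Ohio State', 'Michigan', 'Penn State', 'Iowa', 'Wisconsin', 'Nebraska', 'Minnesota', 'Purdue', 'Illinois', 'Indiana', 'Northwestern', 'Maryland', 'Rutgers', 'Oregon', 'Washington', 'USC', 'UCLA'],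
--         'Big 12': ['Utah', 'BYU', 'Arizona', 'Arizona State', 'Colorado', 'Kansas', 'Kansas State', 'Oklahoma State', 'TCU', 'Texas Tech', 'Baylor', 'Iowa State', 'Houston', 'UCF', 'Cincinnati', 'West Virginia'],
--         'ACC': ['Florida State', 'Clemson', 'Miami', 'North Carolina', 'Virginia Tech', 'Pittsburgh', 'Louisville', 'Boston College', 'Syracuse', 'Wake Forest', 'Duke', 'Georgia Tech', 'NC State', 'Virginia', 'California', 'Stanford', 'SMU']
--     }
--
--     for conf, teams in conferences.items():
--         if team_name in teams:
--             return conf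
--     return 'Other'
-- ===== SOURCE B (Python) =====
-- # Flat reverse index written out once: team -> conference; lookup with default, no scanning loop.
-- _TEAM_TO_CONF = {
--     'Alabama': 'SEC', 'Georgia': 'SEC', 'LSU': 'SEC', 'Texas': 'SEC',
--     'Oklahoma': 'SEC', 'Auburn': 'SEC', 'Florida': 'SEC', 'Tennessee': 'SEC',
--     'Arkansas': 'SEC', 'Ole Miss': 'SEC', 'Mississippi State': 'SEC', 'South Carolina': 'SEC',
--     'Missouri': 'SEC', 'Kentucky': 'SEC', 'Vanderbilt': 'SEC', 'Texas A&M': 'SEC',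
--     'Ohio State': 'Big Ten', 'Michigan': 'Big Ten', 'Penn State': 'Big Ten', 'Iowa': 'Big Ten',
--     'Wisconsin': 'Big Ten', 'Nebraska': 'Big Ten', 'Minnesota': 'Big Ten', 'Purdue': 'Big Ten',
--     'Illinois': 'Big Ten', 'Indiana': 'Big Ten', 'Northwestern': 'Big Ten', 'Maryland': 'Big Ten',
--     'Rutgers': 'Big Ten', 'Oregon': 'Big Ten', 'Washington': 'Big Ten', 'USC': 'Big Ten',
--     'UCLA': 'Big Ten', 'Utah': 'Big 12', 'BYU': 'Big 12', 'Arizona': 'Big 12',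
--     'Arizona State': 'Big 12', 'Colorado': 'Big 12', 'Kansas': 'Big 12', 'Kansas State': 'Big 12',
--     'Oklahoma State': 'Big 12', 'TCU': 'Big 12', 'Texas Tech': 'Big 12', 'Baylor': 'Big 12',
--     'Iowa State': 'Big 12', 'Houston': 'Big 12', 'UCF': 'Big 12', 'Cincinnati': 'Big 12',
--     'West Virginia': 'Big 12', 'Florida State': 'ACC', 'Clemson': 'ACC', 'Miami': 'ACC',
--     'North Carolina': 'ACC', 'Virginia Tech': 'ACC', 'Pittsburgh': 'ACC', 'Louisville': 'ACC',
--     'Boston College': 'ACC', 'Syracuse': 'ACC', 'Wake Forest': 'ACC', 'Duke': 'ACC',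
--     'Georgia Tech': 'ACC', 'NC State': 'ACC', 'Virginia': 'ACC', 'California': 'ACC',
--     'Stanford': 'ACC', 'SMU': 'ACC',
-- }
--
-- def get_team_conference(team_name):
--     """Get conference for a team"""
--     return _TEAM_TO_CONF.get(team_name, 'Other')
-- ===== Notes on version B (the rewrite author's own statement) =====
-- stated objective: simpler
-- what changed: B replaces the per-conference membership-scanning loop with a flat reverse-index dict literal (team -> conference) and a single dict lookup with default 'Other'; no loop runs per call.
import Mathlib
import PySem

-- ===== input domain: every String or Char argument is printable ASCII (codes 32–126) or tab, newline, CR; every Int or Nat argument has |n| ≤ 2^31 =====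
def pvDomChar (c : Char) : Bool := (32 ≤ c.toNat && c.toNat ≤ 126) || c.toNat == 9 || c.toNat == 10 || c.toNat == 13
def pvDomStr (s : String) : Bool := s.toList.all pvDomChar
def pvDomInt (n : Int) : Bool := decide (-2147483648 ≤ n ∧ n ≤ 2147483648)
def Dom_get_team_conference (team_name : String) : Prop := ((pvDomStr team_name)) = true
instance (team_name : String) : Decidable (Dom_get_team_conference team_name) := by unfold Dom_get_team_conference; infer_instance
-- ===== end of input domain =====

-- B replaces A's per-conference membership-scanning loop by a flat reverse-index dict literal
-- (team → conference) queried with one lookup and default 'Other' (simpler: loop-free).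

-- ===== PORT A =====
-- the literal dict of conferences, as its items list (iteration order = insertion order)
def pvConfs : List (String × List String) :=
  [("SEC", ["Alabama", "Georgia", "LSU", "Texas", "Oklahoma", "Auburn", "Florida", "Tennessee", "Arkansas", "Ole Miss", "Mississippi State", "South Carolina", "Missouri", "Kentucky", "Vanderbilt", "Texas A&M"]),
   ("Big Ten", ["Ohio State", "Michigan", "Penn State", "Iowa", "Wisconsin", "Nebraska", "Minnesota", "Purdue", "Illinois", "Indiana", "Northwestern", "Maryland", "Rutgers", "Oregon", "Washington", "USC", "UCLA"]),
   ("Big 12", ["Utah", "BYU", "Arizona", "Arizona State", "Colorado", "Kansas", "Kansas State", "Oklahoma State", "TCU", "Texas Tech", "Baylor", "Iowa State", "Houston", "UCF", "Cincinnati", "West Virginia"]),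
   ("ACC", ["Florida State", "Clemson", "Miami", "North Carolina", "Virginia Tech", "Pittsburgh", "Louisville", "Boston College", "Syracuse", "Wake Forest", "Duke", "Georgia Tech", "NC State", "Virginia", "California", "Stanford", "SMU"])]

-- 'for conf, teams in conferences.items(): if team_name in teams: return conf' / 'return "Other"'
def pvScan (team_name : String) : List (String × List String) → String
  | [] => "Other"
  | (conf, teams) :: rest => if teams.contains team_name then conf else pvScan team_name rest

def get_team_conference (team_name : String) : String := pvScan team_name pvConfs

-- ===== PORT B =====
-- Source B's _TEAM_TO_CONF dict literal (all 66 keys distinct, so its items are exactly this list)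
def pvTeamToConf : PySem.Dict String String :=
  PySem.Dict.mk
  [
   ("Alabama", "SEC"), ("Georgia", "SEC"), ("LSU", "SEC"),
   ("Texas", "SEC"), ("Oklahoma", "SEC"), ("Auburn", "SEC"),
   ("Florida", "SEC"), ("Tennessee", "SEC"), ("Arkansas", "SEC"),
   ("Ole Miss", "SEC"), ("Mississippi State", "SEC"), ("South Carolina", "SEC"),
   ("Missouri", "SEC"), ("Kentucky", "SEC"), ("Vanderbilt", "SEC"),
   ("Texas A&M", "SEC"), ("Ohio State", "Big Ten"), ("Michigan", "Big Ten"),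
   ("Penn State", "Big Ten"), ("Iowa", "Big Ten"), ("Wisconsin", "Big Ten"),
   ("Nebraska", "Big Ten"), ("Minnesota", "Big Ten"), ("Purdue", "Big Ten"),
   ("Illinois", "Big Ten"), ("Indiana", "Big Ten"), ("Northwestern", "Big Ten"),
   ("Maryland", "Big Ten"), ("Rutgers", "Big Ten"), ("Oregon", "Big Ten"),
   ("Washington", "Big Ten"), ("USC", "Big Ten"), ("UCLA", "Big Ten"),
   ("Utah", "Big 12"), ("BYU", "Big 12"), ("Arizona", "Big 12"),
   ("Arizona State", "Big 12"), ("Colorado", "Big 12"), ("Kansas", "Big 12"),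
   ("Kansas State", "Big 12"), ("Oklahoma State", "Big 12"), ("TCU", "Big 12"),
   ("Texas Tech", "Big 12"), ("Baylor", "Big 12"), ("Iowa State", "Big 12"),
   ("Houston", "Big 12"), ("UCF", "Big 12"), ("Cincinnati", "Big 12"),
   ("West Virginia", "Big 12"), ("Florida State", "ACC"), ("Clemson", "ACC"),
   ("Miami", "ACC"), ("North Carolina", "ACC"), ("Virginia Tech", "ACC"),
   ("Pittsburgh", "ACC"), ("Louisville", "ACC"), ("Boston College", "ACC"),
   ("Syracuse", "ACC"), ("Wake Forest", "ACC"), ("Duke", "ACC"),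
   ("Georgia Tech", "ACC"), ("NC State", "ACC"), ("Virginia", "ACC"),
   ("California", "ACC"), ("Stanford", "ACC"), ("SMU", "ACC")]

-- '_TEAM_TO_CONF.get(team_name, 'Other')'
def get_team_conference_alt (team_name : String) : String :=
  pvTeamToConf.getD team_name "Other"

-- ===== PRECONDITION & SPEC =====
def Spec_get_team_conference (team_name : String) (out : String) : Prop := out = get_team_conference_alt team_name
instance (team_name : String) (out : String) : Decidable (Spec_get_team_conference team_name out) := by unfold Spec_get_team_conference; infer_instance

-- ===== CLAIM (what is proved, stated in full; the proofs are below) =====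
def Claim_equal_get_team_conference : Prop := ∀ (team_name : String), Dom_get_team_conference team_name → Spec_get_team_conference team_name (get_team_conference team_name)

-- ===== LEMMAS AND PROOFS =====
-- B's flat dict literal is exactly the flattening of A's conference table
theorem pv_index_eq :
    pvTeamToConf = PySem.Dict.mk (pvConfs.flatMap (fun p => p.2.map (fun x => (x, p.1)))) := by
  decide

-- looking up t in the block mapping every member of `teams` to `conf` finds `conf` iff t is a member
theorem pv_get?_block (t conf : String) (teams : List String) (rest : List (String × String)) :
    (PySem.Dict.mk ((teams.map (fun x => (x, conf))) ++ rest)).get? t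
      = if teams.contains t then some conf else (PySem.Dict.mk rest).get? t := by
  induction teams with
  | nil => simp
  | cons a as ih =>
      simp only [List.map_cons, List.cons_append, PySem.Dict.get?_mk_cons, ih,
        List.contains_cons]
      by_cases h : a = t
      · simp [h]
      · have : (a == t) = false := by simp [h]
        simp [this, beq_iff_eq, Ne.symm h]

-- the scanning loop equals a first-match lookup in the flattened reverse index
theorem pv_scan_eq_lookup (t : String) (L : List (String × List String)) :
    pvScan t L
      = ((PySem.Dict.mk (L.flatMap (fun p => p.2.map (fun x => (x, p.1))))).get? t).getD "Other" := by
  induction L with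
  | nil => simp [pvScan, PySem.Dict.get?]
  | cons p ps ih =>
      obtain ⟨conf, teams⟩ := p
      simp only [pvScan, List.flatMap_cons, pv_get?_block]
      by_cases h : t ∈ teams
      · simp [h]
      · simp [h, ih]

-- ===== VERDICT (by name: the statement is the Claim_ definition above) =====
theorem get_team_conference_spec : Claim_equal_get_team_conference := by
  intro t _
  unfold Spec_get_team_conference get_team_conference get_team_conference_alt
  rw [PySem.Dict.getD_eq_get?_getD, pv_scan_eq_lookup, pv_index_eq]
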